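-- pv_equiv track=rewrite | github.com/StrategicMilk/Vetinari-Orchestrastor | scripts/generate_route_to_test_matrix.py | _detect_auth
-- ===== SOURCE A (Python) =====
-- def _detect_auth(decorators: list[str]) -> str:
--     if any("@require_admin_token" in line for line in decorators):
--         return "admin-token"
--     if any("@require_admin" in line for line in decorators):
--         return "admin/local"
--     if any("admin_guard" in line for line in decorators):
--         return "admin-guard"
--     return "unspecified"
-- ===== SOURCE B (Python) =====
-- def _detect_auth(decorators: list[str]) -> str:
--     # Single pass: keep the best (lowest) priority rank seen, then map it to a label.
--     best = 3
--     for line in decorators: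
--         if "@require_admin_token" in line:
--             rank = 0
--         elif "@require_admin" in line:
--             rank = 1
--         elif "admin_guard" in line:
--             rank = 2
--         else:
--             rank = 3
--         if rank < best:
--             best = rank
--     return ("admin-token", "admin/local", "admin-guard", "unspecified")[best]
-- ===== Notes on version B (the rewrite author's own statement) =====
-- stated objective: faster
-- what changed: Replaces three separate any() scans over the list with one pass that keeps a running minimum priority rank per line and maps the final rank to its label.
import Mathlib
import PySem

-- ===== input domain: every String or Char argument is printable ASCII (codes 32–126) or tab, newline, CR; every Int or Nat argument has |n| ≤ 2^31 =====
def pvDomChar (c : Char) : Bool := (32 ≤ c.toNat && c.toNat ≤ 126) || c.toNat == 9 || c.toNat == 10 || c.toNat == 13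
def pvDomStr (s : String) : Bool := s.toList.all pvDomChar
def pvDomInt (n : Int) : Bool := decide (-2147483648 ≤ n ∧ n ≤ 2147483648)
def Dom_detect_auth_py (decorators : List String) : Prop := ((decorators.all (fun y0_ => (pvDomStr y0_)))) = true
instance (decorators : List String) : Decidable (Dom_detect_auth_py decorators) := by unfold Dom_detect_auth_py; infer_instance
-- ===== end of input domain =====

-- One-line note: B makes a single pass keeping the minimum priority rank, instead of A's three any() scans; objective: alternative.
-- ===== PORT A =====
def detect_auth_py (decorators : List String) : String :=
  if decorators.any (fun line => PySem.Str.isIn "@require_admin_token" line) then "admin-token"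
  else if decorators.any (fun line => PySem.Str.isIn "@require_admin" line) then "admin/local"
  else if decorators.any (fun line => PySem.Str.isIn "admin_guard" line) then "admin-guard"
  else "unspecified"

-- ===== PORT B =====
-- per-line priority rank (0 highest), checked token pattern first
def pvRankLine (line : String) : Nat :=
  if PySem.Str.isIn "@require_admin_token" line then 0
  else if PySem.Str.isIn "@require_admin" line then 1
  else if PySem.Str.isIn "admin_guard" line then 2
  else 3

def detect_auth_py_alt (decorators : List String) : String :=
  let best := decorators.foldl (fun b line => if pvRankLine line < b then pvRankLine line else b) 3
  if best = 0 then "admin-token"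
  else if best = 1 then "admin/local"
  else if best = 2 then "admin-guard"
  else "unspecified"

-- ===== PRECONDITION & SPEC =====
def Spec_detect_auth_py (decorators : List String) (out : String) : Prop := out = detect_auth_py_alt decorators
instance (decorators : List String) (out : String) : Decidable (Spec_detect_auth_py decorators out) := by unfold Spec_detect_auth_py; infer_instance

-- ===== CLAIM (what is proved, stated in full; the proofs are below) =====
def Claim_equal_detect_auth_py : Prop := ∀ (decorators : List String), Dom_detect_auth_py decorators → Spec_detect_auth_py decorators (detect_auth_py decorators)

-- ===== LEMMAS AND PROOFS =====

-- ===== VERDICT (by name: the statement is the Claim_ definition above) =====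
-- the fold computes the minimum rank over the list
lemma fold_eq_min (l : List String) (a : Nat) :
    l.foldl (fun b line => if pvRankLine line < b then pvRankLine line else b) a
      = (l.map pvRankLine).foldl min a := by
  induction l generalizing a with
  | nil => rfl
  | cons x t ih =>
      simp only [List.foldl, List.map]
      rw [ih]
      congr 1
      by_cases h : pvRankLine x < a
      · simp [h, Nat.min_eq_right (Nat.le_of_lt h)]
      · simp [h, Nat.min_eq_left (Nat.le_of_not_lt h)]

lemma rank0_iff (x : String) :
    pvRankLine x = 0 ↔ PySem.Str.isIn "@require_admin_token" x = true := by
  unfold pvRankLine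
  cases h1 : PySem.Str.isIn "@require_admin_token" x <;>
    cases h2 : PySem.Str.isIn "@require_admin" x <;>
      cases h3 : PySem.Str.isIn "admin_guard" x <;> simp_all

lemma rank1_iff (x : String) :
    pvRankLine x = 1 ↔ (PySem.Str.isIn "@require_admin_token" x = false ∧
      PySem.Str.isIn "@require_admin" x = true) := by
  unfold pvRankLine
  cases h1 : PySem.Str.isIn "@require_admin_token" x <;>
    cases h2 : PySem.Str.isIn "@require_admin" x <;>
      cases h3 : PySem.Str.isIn "admin_guard" x <;> simp_all

lemma rank2_iff (x : String) :
    pvRankLine x = 2 ↔ (PySem.Str.isIn "@require_admin_token" x = false ∧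
      PySem.Str.isIn "@require_admin" x = false ∧
      PySem.Str.isIn "admin_guard" x = true) := by
  unfold pvRankLine
  cases h1 : PySem.Str.isIn "@require_admin_token" x <;>
    cases h2 : PySem.Str.isIn "@require_admin" x <;>
      cases h3 : PySem.Str.isIn "admin_guard" x <;> simp_all

lemma rank_le1_of (x : String) (h : PySem.Str.isIn "@require_admin" x = true) :
    pvRankLine x ≤ 1 := by
  unfold pvRankLine
  cases h1 : PySem.Str.isIn "@require_admin_token" x <;> simp_all

lemma rank_le2_of (x : String) (h : PySem.Str.isIn "admin_guard" x = true) :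
    pvRankLine x ≤ 2 := by
  unfold pvRankLine
  cases h1 : PySem.Str.isIn "@require_admin_token" x <;>
    cases h2 : PySem.Str.isIn "@require_admin" x <;> simp_all

lemma best_le (l : List String) (x : String) (hx : x ∈ l) :
    (l.map pvRankLine).foldl min 3 ≤ pvRankLine x :=
  (PySem.List.foldl_min_le (l.map pvRankLine) 3).2 _ (List.mem_map_of_mem hx)

lemma best_ne (l : List String) (n : Nat) (hn : n < 3)
    (h : ∀ x ∈ l, pvRankLine x ≠ n) : (l.map pvRankLine).foldl min 3 ≠ n := by
  rcases PySem.List.foldl_min_mem (l.map pvRankLine) 3 with he | hm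
  · omega
  · obtain ⟨x, hx, hxr⟩ := List.mem_map.mp hm
    exact hxr ▸ h x hx

theorem detect_auth_py_spec : Claim_equal_detect_auth_py := by
  intro decorators _
  unfold Spec_detect_auth_py detect_auth_py detect_auth_py_alt
  rw [fold_eq_min]
  cases hA0 : decorators.any (fun line => PySem.Str.isIn "@require_admin_token" line) with
  | true =>
      obtain ⟨x, hx, hxt⟩ := List.any_eq_true.mp hA0
      have h0 : (decorators.map pvRankLine).foldl min 3 = 0 :=
        Nat.le_zero.mp (((rank0_iff x).mpr hxt) ▸ best_le decorators x hx)
      simp [h0]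
  | false =>
      have hno0 : ∀ x ∈ decorators, pvRankLine x ≠ 0 := by
        intro x hx h
        have := List.any_eq_true.mpr ⟨x, hx, (rank0_iff x).mp h⟩
        rw [hA0] at this; exact Bool.noConfusion this
      have hbne0 := best_ne decorators 0 (by omega) hno0
      cases hA1 : decorators.any (fun line => PySem.Str.isIn "@require_admin" line) with
      | true =>
          obtain ⟨x, hx, hxt⟩ := List.any_eq_true.mp hA1
          have hle := le_trans (best_le decorators x hx) (rank_le1_of x hxt)
          have h1 : (decorators.map pvRankLine).foldl min 3 = 1 := by omega
          simp [h1]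
      | false =>
          have hno1 : ∀ x ∈ decorators, pvRankLine x ≠ 1 := by
            intro x hx h
            have := List.any_eq_true.mpr ⟨x, hx, ((rank1_iff x).mp h).2⟩
            rw [hA1] at this; exact Bool.noConfusion this
          have hbne1 := best_ne decorators 1 (by omega) hno1
          cases hA2 : decorators.any (fun line => PySem.Str.isIn "admin_guard" line) with
          | true =>
              obtain ⟨x, hx, hxt⟩ := List.any_eq_true.mp hA2
              have hle := le_trans (best_le decorators x hx) (rank_le2_of x hxt)
              have h2 : (decorators.map pvRankLine).foldl min 3 = 2 := by omega
              simp [h2]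
          | false =>
              have hno2 : ∀ x ∈ decorators, pvRankLine x ≠ 2 := by
                intro x hx h
                have := List.any_eq_true.mpr ⟨x, hx, ((rank2_iff x).mp h).2.2⟩
                rw [hA2] at this; exact Bool.noConfusion this
              have hbne2 := best_ne decorators 2 (by omega) hno2
              simp [hbne0, hbne1, hbne2]
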